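-- pv_equiv track=rewrite | github.com/htem/PPC_inhibitoryMotifs | modelling/opponent-inhibition-models/modules/data_analysis_tools.py | indices_neurons_EIchoice
-- ===== SOURCE A (Python) =====
-- def indices_neurons_EIchoice(signature, idx_c=None):
--     """
--     :param idx_c: indices of choice_1 and choice_2 (+NS)  neurons (pooled over E and I), as list containing 2 (or 3) lists
--     :param signature: neuron type: 1 if E, -1 if I
--     :return: indices of C1 or C2 selective neurons separated for E and I
--     """
--
--     idx_e = [i for i, type in enumerate(signature) if type == 1]
--     idx_i = [i for i, type in enumerate(signature) if type == -1]
--     result_dict = dict(idx_e=idx_e, idx_i=idx_i)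
--
--     if idx_c is None:
--         return result_dict
--
--     elif idx_c is not None:
--         idx_1 = idx_c[0]
--         idx_2 = idx_c[1]
--         idx_e1 = [i for i, type in enumerate(signature) if i in idx_1 and type == 1]
--         idx_e2 = [i for i, type in enumerate(signature) if i in idx_2 and type == 1]
--         idx_i1 = [i for i, type in enumerate(signature) if i in idx_1 and type == -1]
--         idx_i2 = [i for i, type in enumerate(signature) if i in idx_2 and type == -1]
--         result_dict.update(dict(idx_e1=idx_e1, idx_e2=idx_e2, idx_i1=idx_i1, idx_i2=idx_i2))
--
--         if len(idx_c)==2: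
--             return result_dict
--
--         elif len(idx_c) == 3:
--             idx_0 = idx_c[2] # non-choice selective neurons
--             idx_e0 = [i for i, type in enumerate(signature) if i in idx_0 and type == 1]
--             idx_i0 = [i for i, type in enumerate(signature) if i in idx_0 and type == -1]
--             result_dict.update(dict(idx_e0=idx_e0, idx_i0=idx_i0))
--             return result_dict
-- ===== SOURCE B (Python) =====
-- def indices_neurons_EIchoice(signature, idx_c=None):
--     # Single pass over enumerate(signature), appending each index into the
--     # relevant buckets, instead of eight separate comprehensions.
--     idx_e, idx_i = [], []
--     if idx_c is None:
--         for i, t in enumerate(signature):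
--             if t == 1:
--                 idx_e.append(i)
--             elif t == -1:
--                 idx_i.append(i)
--         return dict(idx_e=idx_e, idx_i=idx_i)
--
--     idx_1 = idx_c[0]
--     idx_2 = idx_c[1]
--     n = len(idx_c)
--     idx_0 = idx_c[2] if n == 3 else []
--     e1, e2, e0, i1, i2, i0 = [], [], [], [], [], []
--     for i, t in enumerate(signature):
--         if t == 1:
--             idx_e.append(i)
--             if i in idx_1: e1.append(i)
--             if i in idx_2: e2.append(i)
--             if i in idx_0: e0.append(i)
--         elif t == -1:
--             idx_i.append(i)
--             if i in idx_1: i1.append(i)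
--             if i in idx_2: i2.append(i)
--             if i in idx_0: i0.append(i)
--     d = dict(idx_e=idx_e, idx_i=idx_i, idx_e1=e1, idx_e2=e2, idx_i1=i1, idx_i2=i2)
--     if n == 2:
--         return d
--     elif n == 3:
--         d.update(dict(idx_e0=e0, idx_i0=i0))
--         return d
-- ===== Notes on version B (the rewrite author's own statement) =====
-- stated objective: alternative
-- what changed: Replaces A's eight separate filtered enumerations of signature with a single pass over enumerate(signature) that appends each index into the appropriate E/I and choice buckets.
-- outside the precondition, e.g. on indices_neurons_EIchoice([1, -1], [[0], [1], [0], [1]]): A returns None, B returns None; on indices_neurons_EIchoice([1, -1], [[0]]): A raises IndexError, B raises IndexError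
import Mathlib
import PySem

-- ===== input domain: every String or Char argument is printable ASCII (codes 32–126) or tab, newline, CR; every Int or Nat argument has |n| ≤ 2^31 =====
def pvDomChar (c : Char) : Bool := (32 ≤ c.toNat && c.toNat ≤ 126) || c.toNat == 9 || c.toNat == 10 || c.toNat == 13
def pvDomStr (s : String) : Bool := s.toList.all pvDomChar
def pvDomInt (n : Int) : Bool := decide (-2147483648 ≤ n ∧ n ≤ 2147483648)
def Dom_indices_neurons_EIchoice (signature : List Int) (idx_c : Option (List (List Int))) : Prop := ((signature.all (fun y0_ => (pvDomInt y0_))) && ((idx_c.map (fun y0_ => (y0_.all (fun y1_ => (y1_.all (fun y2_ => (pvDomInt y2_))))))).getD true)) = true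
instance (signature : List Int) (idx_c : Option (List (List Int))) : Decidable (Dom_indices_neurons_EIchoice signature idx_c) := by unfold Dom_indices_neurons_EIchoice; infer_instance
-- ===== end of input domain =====

-- B replaces A's eight separate filtered enumerations with one single pass over
-- enumerate(signature) that appends each index into the appropriate buckets (alternative decomposition).

-- ===== PORT A =====
def indices_neurons_EIchoice (signature : List Int) (idx_c : Option (List (List Int))) : List (String × List Int) :=
  let idx_e := ((PySem.List.enumerate signature).filter (fun p => p.2 == 1)).map (fun p => p.1)
  let idx_i := ((PySem.List.enumerate signature).filter (fun p => p.2 == -1)).map (fun p => p.1)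
  match idx_c with
  | none => [("idx_e", idx_e), ("idx_i", idx_i)]
  | some c =>
    match PySem.List.pyGet? c 0, PySem.List.pyGet? c 1 with
    | some idx_1, some idx_2 =>
      let idx_e1 := ((PySem.List.enumerate signature).filter (fun p => idx_1.contains p.1 && p.2 == 1)).map (fun p => p.1)
      let idx_e2 := ((PySem.List.enumerate signature).filter (fun p => idx_2.contains p.1 && p.2 == 1)).map (fun p => p.1)
      let idx_i1 := ((PySem.List.enumerate signature).filter (fun p => idx_1.contains p.1 && p.2 == -1)).map (fun p => p.1)
      let idx_i2 := ((PySem.List.enumerate signature).filter (fun p => idx_2.contains p.1 && p.2 == -1)).map (fun p => p.1)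
      if c.length = 2 then
        [("idx_e", idx_e), ("idx_i", idx_i), ("idx_e1", idx_e1), ("idx_e2", idx_e2), ("idx_i1", idx_i1), ("idx_i2", idx_i2)]
      else if c.length = 3 then
        match PySem.List.pyGet? c 2 with
        | some idx_0 =>
          let idx_e0 := ((PySem.List.enumerate signature).filter (fun p => idx_0.contains p.1 && p.2 == 1)).map (fun p => p.1)
          let idx_i0 := ((PySem.List.enumerate signature).filter (fun p => idx_0.contains p.1 && p.2 == -1)).map (fun p => p.1)
          [("idx_e", idx_e), ("idx_i", idx_i), ("idx_e1", idx_e1), ("idx_e2", idx_e2), ("idx_i1", idx_i1), ("idx_i2", idx_i2), ("idx_e0", idx_e0), ("idx_i0", idx_i0)]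
        | none => []  -- unreachable: length = 3
      else []  -- Python A returns None here (outside Pre_)
    | _, _ => []  -- Python A raises IndexError here (outside Pre_)

-- ===== PORT B =====
structure EIState where
  e  : List Int
  i  : List Int
  e1 : List Int
  e2 : List Int
  e0 : List Int
  i1 : List Int
  i2 : List Int
  i0 : List Int
deriving Repr, DecidableEq

def eiStep (idx1 idx2 idx0 : List Int) (s : EIState) (p : Int × Int) : EIState :=
  if p.2 == 1 then
    { s with
      e  := s.e ++ [p.1],
      e1 := if idx1.contains p.1 then s.e1 ++ [p.1] else s.e1,
      e2 := if idx2.contains p.1 then s.e2 ++ [p.1] else s.e2,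
      e0 := if idx0.contains p.1 then s.e0 ++ [p.1] else s.e0 }
  else if p.2 == -1 then
    { s with
      i  := s.i ++ [p.1],
      i1 := if idx1.contains p.1 then s.i1 ++ [p.1] else s.i1,
      i2 := if idx2.contains p.1 then s.i2 ++ [p.1] else s.i2,
      i0 := if idx0.contains p.1 then s.i0 ++ [p.1] else s.i0 }
  else s

def indices_neurons_EIchoice_alt (signature : List Int) (idx_c : Option (List (List Int))) : List (String × List Int) :=
  match idx_c with
  | none =>
    let s := (PySem.List.enumerate signature).foldl
      (fun (acc : List Int × List Int) p =>
        if p.2 == 1 then (acc.1 ++ [p.1], acc.2)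
        else if p.2 == -1 then (acc.1, acc.2 ++ [p.1])
        else acc) ([], [])
    [("idx_e", s.1), ("idx_i", s.2)]
  | some c =>
    match PySem.List.pyGet? c 0 with
    | none => []  -- IndexError (outside Pre_)
    | some idx_1 =>
    match PySem.List.pyGet? c 1 with
    | none => []  -- IndexError (outside Pre_)
    | some idx_2 =>
      let idx_0 := if c.length = 3 then (PySem.List.pyGet? c 2).getD [] else []
      let s := (PySem.List.enumerate signature).foldl (eiStep idx_1 idx_2 idx_0)
                 ⟨[], [], [], [], [], [], [], []⟩
      if c.length = 2 then
        [("idx_e", s.e), ("idx_i", s.i), ("idx_e1", s.e1), ("idx_e2", s.e2), ("idx_i1", s.i1), ("idx_i2", s.i2)]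
      else if c.length = 3 then
        [("idx_e", s.e), ("idx_i", s.i), ("idx_e1", s.e1), ("idx_e2", s.e2), ("idx_i1", s.i1), ("idx_i2", s.i2), ("idx_e0", s.e0), ("idx_i0", s.i0)]
      else []  -- Python B falls through returning None (outside Pre_)

-- ===== PRECONDITION & SPEC =====
-- Pre_ excludes idx_c lists whose length is not 2 or 3: for length < 2 Python A raises
-- IndexError, and for length ≥ 4 A falls off the end and returns None instead of a dict.
def Pre_indices_neurons_EIchoice (signature : List Int) (idx_c : Option (List (List Int))) : Prop :=
  ∀ c ∈ idx_c, c.length = 2 ∨ c.length = 3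
instance (signature : List Int) (idx_c : Option (List (List Int))) : Decidable (Pre_indices_neurons_EIchoice signature idx_c) := by unfold Pre_indices_neurons_EIchoice; infer_instance

def pvWitness_indices_neurons_EIchoice : List Int × Option (List (List Int)) := ([1, -1, 0], some [[0], [1]])

def Spec_indices_neurons_EIchoice (signature : List Int) (idx_c : Option (List (List Int))) (out : List (String × List Int)) : Prop := out = indices_neurons_EIchoice_alt signature idx_c
instance (signature : List Int) (idx_c : Option (List (List Int))) (out : List (String × List Int)) : Decidable (Spec_indices_neurons_EIchoice signature idx_c out) := by unfold Spec_indices_neurons_EIchoice; infer_instance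

-- ===== CLAIM (what is proved, stated in full; the proofs are below) =====
def Claim_equal_indices_neurons_EIchoice : Prop := ∀ (signature : List Int) (idx_c : Option (List (List Int))), Dom_indices_neurons_EIchoice signature idx_c → Pre_indices_neurons_EIchoice signature idx_c → Spec_indices_neurons_EIchoice signature idx_c (indices_neurons_EIchoice signature idx_c)

-- ===== LEMMAS AND PROOFS =====

theorem foldl_pair_eq (ps : List (Int × Int)) (a b : List Int) :
    ps.foldl
      (fun (acc : List Int × List Int) p =>
        if p.2 == 1 then (acc.1 ++ [p.1], acc.2)
        else if p.2 == -1 then (acc.1, acc.2 ++ [p.1])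
        else acc) (a, b)
    = (a ++ (ps.filter (fun p => p.2 == 1)).map (fun p => p.1),
       b ++ (ps.filter (fun p => p.2 == -1)).map (fun p => p.1)) := by
  induction ps generalizing a b with
  | nil => simp
  | cons p ps ih =>
    rw [List.foldl_cons]
    by_cases h1 : p.2 = 1
    · rw [if_pos (by simp [h1])]; rw [ih]; simp [List.filter_cons, h1]
    · by_cases h2 : p.2 = -1
      · rw [if_neg (by simp [h1]), if_pos (by simp [h2])]; rw [ih]; simp [List.filter_cons, h1, h2]
      · rw [if_neg (by simp [h1]), if_neg (by simp [h2])]; rw [ih]; simp [List.filter_cons, h1, h2]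

theorem foldl_eiStep_eq (idx1 idx2 idx0 : List Int) (ps : List (Int × Int)) (s : EIState) :
    ps.foldl (eiStep idx1 idx2 idx0) s =
      { e  := s.e  ++ (ps.filter (fun p => p.2 == 1)).map (fun p => p.1),
        i  := s.i  ++ (ps.filter (fun p => p.2 == -1)).map (fun p => p.1),
        e1 := s.e1 ++ (ps.filter (fun p => idx1.contains p.1 && p.2 == 1)).map (fun p => p.1),
        e2 := s.e2 ++ (ps.filter (fun p => idx2.contains p.1 && p.2 == 1)).map (fun p => p.1),
        e0 := s.e0 ++ (ps.filter (fun p => idx0.contains p.1 && p.2 == 1)).map (fun p => p.1),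
        i1 := s.i1 ++ (ps.filter (fun p => idx1.contains p.1 && p.2 == -1)).map (fun p => p.1),
        i2 := s.i2 ++ (ps.filter (fun p => idx2.contains p.1 && p.2 == -1)).map (fun p => p.1),
        i0 := s.i0 ++ (ps.filter (fun p => idx0.contains p.1 && p.2 == -1)).map (fun p => p.1) } := by
  induction ps generalizing s with
  | nil => simp
  | cons p ps ih =>
    rw [List.foldl_cons, ih]
    by_cases h1 : p.2 = 1
    · by_cases m1 : p.1 ∈ idx1 <;> by_cases m2 : p.1 ∈ idx2 <;> by_cases m0 : p.1 ∈ idx0 <;>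
        simp [eiStep, h1, m1, m2, m0, List.filter_cons]
    · by_cases h2 : p.2 = -1
      · by_cases m1 : p.1 ∈ idx1 <;> by_cases m2 : p.1 ∈ idx2 <;> by_cases m0 : p.1 ∈ idx0 <;>
          simp [eiStep, h1, h2, m1, m2, m0, List.filter_cons]
      · simp [eiStep, h1, h2, List.filter_cons]

-- ===== VERDICT (by name: the statement is the Claim_ definition above) =====
theorem indices_neurons_EIchoice_spec : Claim_equal_indices_neurons_EIchoice := by
  intro signature idx_c _ hpre
  unfold Spec_indices_neurons_EIchoice indices_neurons_EIchoice indices_neurons_EIchoice_alt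
  match idx_c with
  | none =>
    dsimp only
    rw [foldl_pair_eq]
    simp
  | some c =>
    rcases hpre c rfl with h2 | h3
    · obtain ⟨x, y, rfl⟩ := List.length_eq_two.mp h2
      simp only [PySem.List.pyGet?, PySem.List.pyIdx?]
      norm_num
      rw [foldl_eiStep_eq]
      simp
    · obtain ⟨x, y, z, rfl⟩ := List.length_eq_three.mp h3
      simp only [PySem.List.pyGet?, PySem.List.pyIdx?]
      norm_num
      rw [foldl_eiStep_eq]
      simp
      exact ⟨rfl, rfl⟩
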